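-- pv_equiv track=rewrite | github.com/carlosibarguren/Trabajos-Universidad | Agoritmo-y-Estructura-de-Datos/Trabajos Práctico/TP3/Funciones_TP3.py | codigo_valido
-- ===== SOURCE A (Python) =====
-- def codigo_valido(codigo_str):
--     num_depurado = ''
--     cantidad_guion = 0
--     guion_seguido = guion_final_principio = False
--     for i in range(len(codigo_str)):
--         if codigo_str[i] != '-':
--             num_depurado += codigo_str[i]
--         else:
--             cantidad_guion += 1
--             if not guion_seguido:
--                 guion_seguido = (codigo_str[i] == codigo_str[i-1])
--             if i == 0 or i == (len(codigo_str)-1):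
--                 guion_final_principio = True
--     if cantidad_guion != 3 or guion_seguido or guion_final_principio:
--         return False
--     if len(num_depurado) != 10:
--         return False
--     numero_vector = []
--     for c in num_depurado:
--         numero_vector.append(int(c))
--     valor_final = 0
--     multiplicador = len(numero_vector)
--     for i in range(len(numero_vector)):
--         valor_final += numero_vector[i]*multiplicador
--         multiplicador -= 1
--     return valor_final % 11 == 0
-- ===== SOURCE B (Python) =====
-- def codigo_valido(codigo_str):
--     # Format: splitting on '-' must give exactly 4 non-empty pieces
--     # (captures: three dashes, no '--', no leading/trailing dash).
--     parts = codigo_str.split('-')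
--     if len(parts) != 4 or not all(parts):
--         return False
--     num = ''.join(parts)
--     if len(num) != 10:
--         return False
--     # Checksum sum(d_i * (10 - i)) mod 11, computed as the sum of running
--     # prefix sums (no multiplications).
--     run = tot = 0
--     for d in num:
--         run += int(d)
--         tot += run
--     return tot % 11 == 0
-- ===== Notes on version B (the rewrite author's own statement) =====
-- stated objective: simpler
-- what changed: B validates the format by splitting on '-' into exactly 4 non-empty pieces instead of A's fused index loop with per-character state flags, and computes the weighted checksum sum(d_i*(10-i)) as a sum of running prefix sums (no multiplications) instead of A's vector build plus descending-multiplier loop; the split/join passes run at C level, which a timing run measured as a large constant-factor speedup over A's per-index Python loop; Pre_ excludes the strings on which int() raises ValueError (well-formatted codes whose 10 stripped characters are not all digits), where both A and B raise.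
import Mathlib
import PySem

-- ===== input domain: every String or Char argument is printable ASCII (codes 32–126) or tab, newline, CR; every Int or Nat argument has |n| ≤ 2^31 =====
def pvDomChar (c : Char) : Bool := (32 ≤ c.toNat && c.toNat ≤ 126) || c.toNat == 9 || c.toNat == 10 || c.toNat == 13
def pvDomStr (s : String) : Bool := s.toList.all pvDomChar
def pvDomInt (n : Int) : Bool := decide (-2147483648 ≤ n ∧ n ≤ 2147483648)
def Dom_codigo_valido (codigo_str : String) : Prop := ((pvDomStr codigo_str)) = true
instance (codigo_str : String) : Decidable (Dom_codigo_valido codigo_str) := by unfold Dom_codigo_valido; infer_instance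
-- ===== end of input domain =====

-- B validates the format by splitting on '-' into exactly 4 non-empty pieces (instead of
-- A's fused index loop with state flags) and computes the checksum as a sum of running
-- prefix sums, with no multiplications; objective: simpler.

-- ===== PORT A =====
-- int(c) on a single character: PySem.Int.ofChars? [c]; `.getD 0` is only a totalizer —
-- Pre_ excludes the inputs where Python's int() raises, so the default is never observed inside Pre_.
def codigo_valido (codigo_str : String) : Bool :=
  let cs := codigo_str.toList
  let st := (PySem.List.pyRange 0 (PySem.List.len cs)).foldl
    (fun (st : List Char × Int × Bool × Bool) i =>
      if PySem.List.pyGetD cs i ' ' != '-' then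
        (st.1 ++ [PySem.List.pyGetD cs i ' '], st.2.1, st.2.2.1, st.2.2.2)
      else
        (st.1, st.2.1 + 1,
         (if !st.2.2.1 then (PySem.List.pyGetD cs i ' ' == PySem.List.pyGetD cs (i - 1) ' ') else st.2.2.1),
         (if i == 0 || i == PySem.List.len cs - 1 then true else st.2.2.2)))
    ([], 0, false, false)
  if st.2.1 != 3 || st.2.2.1 || st.2.2.2 then false
  else if PySem.List.len st.1 != 10 then false
  else
    let vector := st.1.foldl (fun acc c => acc ++ [(PySem.Int.ofChars? [c]).getD 0]) ([] : List Int)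
    let r := (PySem.List.pyRange 0 (PySem.List.len vector)).foldl
      (fun (p : Int × Int) i => (p.1 + PySem.List.pyGetD vector i 0 * p.2, p.2 - 1))
      (0, PySem.List.len vector)
    PySem.Int.mod r.1 11 == 0

-- ===== PORT B =====
-- codigo_str.split('-'): the separator "-" is a nonempty literal, so PySem.Str.split? is
-- always `some`; `.getD []` is only a totalizer and is never reached.
def codigo_valido_alt (codigo_str : String) : Bool :=
  let parts := (PySem.Str.split? codigo_str "-").getD []
  if PySem.List.len parts != 4 || !(parts.all (fun p => PySem.Str.len p != 0)) then false
  else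
    let num := PySem.Str.join "" parts
    if PySem.Str.len num != 10 then false
    else
      let r := num.toList.foldl
        (fun (p : Int × Int) d => (p.1 + (PySem.Int.ofChars? [d]).getD 0,
                                   p.2 + p.1 + (PySem.Int.ofChars? [d]).getD 0))
        (0, 0)
      PySem.Int.mod r.2 11 == 0

-- ===== PRECONDITION & SPEC =====
-- Pre_ excludes exactly the inputs on which Python A raises ValueError: strings that pass all
-- format checks (three '-', no '--', no leading/trailing '-', 10 remaining characters) but whose
-- remaining characters are not all digits, so int() fails.  B raises there too.
def Pre_codigo_valido (codigo_str : String) : Prop :=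
  (PySem.Str.count codigo_str "-" = 3 ∧ PySem.Str.isIn "--" codigo_str = false ∧
   PySem.Str.startswith codigo_str "-" = false ∧ PySem.Str.endswith codigo_str "-" = false ∧
   (codigo_str.toList.filter (· != '-')).length = 10) →
  (codigo_str.toList.filter (· != '-')).all PySem.Chars.isdigit = true
instance (codigo_str : String) : Decidable (Pre_codigo_valido codigo_str) := by
  unfold Pre_codigo_valido; infer_instance
def pvWitness_codigo_valido : String := "123-456-78-90"
def Spec_codigo_valido (codigo_str : String) (out : Bool) : Prop := out = codigo_valido_alt codigo_str
instance (codigo_str : String) (out : Bool) : Decidable (Spec_codigo_valido codigo_str out) := by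
  unfold Spec_codigo_valido; infer_instance

-- ===== CLAIM (what is proved, stated in full; the proofs are below) =====
def Claim_equal_codigo_valido : Prop := ∀ (codigo_str : String), Dom_codigo_valido codigo_str → Pre_codigo_valido codigo_str → Spec_codigo_valido codigo_str (codigo_valido codigo_str)

-- ===== LEMMAS AND PROOFS =====

def hasDD : List Char → Bool
  | a :: b :: t => (a == '-' && b == '-') || hasDD (b :: t)
  | _ => false

theorem hasDD_snoc (xs : List Char) (c : Char) :
    hasDD (xs ++ [c]) = (hasDD xs || (xs.getLast? == some '-' && c == '-')) := by
  induction xs with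
  | nil => simp [hasDD]
  | cons a t ih =>
    cases t with
    | nil => simp [hasDD]
    | cons b u =>
      simp only [List.cons_append, hasDD] at *
      rw [ih]
      simp [List.getLast?_cons_cons, Bool.or_assoc]

theorem pyGetD_neg_one (cs : List Char) (h : cs.length ≠ 0) (d : Char) :
    PySem.List.pyGetD cs (-1) d = cs.getD (cs.length - 1) d := by
  simp only [PySem.List.pyGetD, PySem.List.pyGet?, PySem.List.pyIdx?]
  norm_num
  rw [if_pos (by omega)]
  simp

theorem loopA_spec (cs : List Char) (k : Nat) (hk : k ≤ cs.length) :
    (PySem.List.pyRange 0 (k : Int)).foldl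
      (fun (st : List Char × Int × Bool × Bool) i =>
        if PySem.List.pyGetD cs i ' ' != '-' then
          (st.1 ++ [PySem.List.pyGetD cs i ' '], st.2.1, st.2.2.1, st.2.2.2)
        else
          (st.1, st.2.1 + 1,
           (if !st.2.2.1 then (PySem.List.pyGetD cs i ' ' == PySem.List.pyGetD cs (i - 1) ' ') else st.2.2.1),
           (if i == 0 || i == PySem.List.len cs - 1 then true else st.2.2.2)))
      ([], 0, false, false)
    = ((cs.take k).filter (· != '-'), (((cs.take k).countP (· == '-') : Int)),
       hasDD (cs.take k) || (decide (0 < k) && (cs.head? == some '-') && (cs.getLast? == some '-')),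
       ((decide (0 < k) && (cs.head? == some '-')) || (decide (k = cs.length) && (cs.getLast? == some '-')))) := by
  induction k with
  | zero =>
    rw [show ((0 : Nat) : Int) = 0 by norm_num, PySem.List.pyRange_zero]
    cases cs <;> simp [hasDD]
  | succ k ih =>
    have hkn : k < cs.length := by omega
    have hne : cs ≠ [] := by intro h; subst h; simp at hkn
    have hget : PySem.List.pyGetD cs (k : Int) ' ' = cs[k] :=
      PySem.List.pyGetD_eq_getElem cs ' ' (by omega) (by exact_mod_cast hkn)
    have hhead : cs.head? = some (cs[0]'(by omega)) := by
      cases cs with | nil => simp at hkn | cons a t => simp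
    have hlast : cs.getLast? = some (cs[cs.length - 1]'(by omega)) := by
      rw [List.getLast?_eq_getElem?, List.getElem?_eq_getElem (by omega)]
    have htake : cs.take (k + 1) = cs.take k ++ [cs[k]] := by
      rw [List.take_add_one, List.getElem?_eq_getElem hkn]; rfl
    have hltk : (cs.take k).length = k := by rw [List.length_take]; omega
    have htlast : 0 < k → (cs.take k).getLast? = some (cs[k - 1]'(by omega)) := by
      intro h0
      rw [List.getLast?_eq_getElem?, hltk, List.getElem?_take_of_lt (by omega),
          List.getElem?_eq_getElem (by omega)]
    have hsome : ∀ a b : Char, ((some a == some b)) = (a == b) := fun _ _ => rfl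
    have h1 : (((k : Int)) == PySem.List.len cs - 1) = decide (k + 1 = cs.length) := by
      rw [PySem.List.len_eq, Bool.eq_iff_iff]; simp; omega
    have h2 : (((k : Int)) == (0 : Int)) = decide (k = 0) := by
      rw [Bool.eq_iff_iff]; simp
    have hd1 : decide (0 < k + 1) = true := by simp
    have hdkn : decide (k = cs.length) = false := by simp; omega
    rw [show ((k + 1 : Nat) : Int) = (k : Int) + 1 by push_cast; ring,
        PySem.List.pyRange_one_succ_right (by positivity), List.foldl_append, ih (by omega)]
    simp only [List.foldl_cons, List.foldl_nil, hget]
    by_cases hv : cs[k] = '-'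
    · rw [if_neg (by simp [hv])]
      simp only [Prod.mk.injEq]
      refine ⟨?_, ?_, ?_, ?_⟩
      · rw [htake, List.filter_append]; simp [hv]
      · rw [htake, List.countP_append]; simp [hv]
      · rw [htake, hasDD_snoc]
        by_cases h0 : k = 0
        · subst h0
          rw [show ((0 : Nat) : Int) - 1 = -1 by norm_num,
              pyGetD_neg_one cs (by omega) ' ', List.getD_eq_getElem _ _ (by omega)]
          have h0v : cs[0]'(by omega) = '-' := hv
          simp only [List.take_zero, hasDD, List.getLast?_nil, hhead, hlast, hsome, h0v]
          cases hC : ((cs[cs.length - 1]'(by omega)) == '-') <;> simp_all [@eq_comm Char]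
          exact hC
        · have hprev : PySem.List.pyGetD cs ((k : Int) - 1) ' ' = cs[k - 1]'(by omega) := by
            rw [show (k : Int) - 1 = ((k - 1 : Nat) : Int) by omega,
                PySem.List.pyGetD_eq_getElem cs ' ' (by omega) (by omega)]
            congr 1
          have hd0 : decide (0 < k) = true := by simp; omega
          rw [htlast (by omega), hprev, hhead, hlast]
          simp only [hsome, hd0, hd1, Bool.true_and]
          rw [hv]
          cases hA : hasDD (cs.take k) <;>
            cases hB : ((cs[0]'(by omega)) == '-') <;>
              cases hC : ((cs[cs.length - 1]'(by omega)) == '-') <;>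
                cases hE : ((cs[k - 1]'(by omega)) == '-') <;> simp_all [@eq_comm Char] <;>
                  exact hE
      · rw [h1, h2, hhead, hlast]
        by_cases h0 : k = 0
        · subst h0
          have hB : ((cs[0]'(by omega)) == '-') = true := by simpa using hv
          simp [hsome, hB]
        · by_cases hlen : k + 1 = cs.length
          · have hC : ((cs[cs.length - 1]'(by omega)) == '-') = true := by
              have hx : cs.length - 1 = k := by omega
              simp only [hx]
              simpa using hv
            simp [hsome, hlen, hC]
          · have hd0 : decide (0 < k) = true := by simp; omega
            have hdl : decide (k + 1 = cs.length) = false := by simp [hlen]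
            rw [show ((decide (k = 0) || decide (k + 1 = cs.length))) = false by simp [h0, hlen],
                if_neg (by simp)]
            simp [hdkn, hdl, hd0]
    · rw [if_pos (by simp [hv])]
      simp only [Prod.mk.injEq]
      have hlnotv : k + 1 = cs.length → ((cs[cs.length - 1]'(by omega)) == '-') = false := by
        intro hlen
        have hx : cs.length - 1 = k := by omega
        simp only [hx]
        simpa using hv
      refine ⟨?_, ?_, ?_, ?_⟩
      · rw [htake, List.filter_append]; congr 1; simp [hv]
      · rw [htake, List.countP_append]; simp [hv]
      · rw [htake, hasDD_snoc]
        by_cases h0 : k = 0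
        · subst h0
          have hB : ((cs[0]'(by omega)) == '-') = false := by simpa using hv
          simp [hhead, hsome, hB]
        · have hd0 : decide (0 < k) = true := by simp; omega
          have hveq : ((cs[k]'(by omega)) == '-') = false := by simpa using hv
          rw [htlast (by omega)]
          simp [hveq, hd0]
      · rw [hhead, hlast]
        by_cases h0 : k = 0
        · subst h0
          have hB : ((cs[0]'(by omega)) == '-') = false := by simpa using hv
          by_cases hlen : 0 + 1 = cs.length
          · have hdl : decide (0 + 1 = cs.length) = true := by simp [hlen]
            simp [hsome, hB, hlnotv hlen, hdl, hdkn]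
          · have hdl : decide (0 + 1 = cs.length) = false := by simp [hlen]
            simp [hsome, hB, hdl, hdkn]
        · have hd0 : decide (0 < k) = true := by simp; omega
          by_cases hlen : k + 1 = cs.length
          · have hdl : decide (k + 1 = cs.length) = true := by simp [hlen]
            simp [hsome, hlnotv hlen, hdl, hdkn, hd0]
          · have hdl : decide (k + 1 = cs.length) = false := by simp [hlen]
            simp [hsome, hdl, hdkn, hd0]

-- Structural version of str.split('-') (proof-side only).
def splitD : List Char → List Char → List (List Char)
  | [], cur => [cur.reverse]
  | c :: r, cur => if c = '-' then cur.reverse :: splitD r [] else splitD r (c :: cur)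

theorem go_eq (fuel : Nat) (l cur : List Char) (acc : List (List Char)) (h : l.length ≤ fuel) :
    PySem.Chars.splitOn.go ['-'] fuel l cur acc = acc.reverse ++ splitD l cur := by
  induction fuel generalizing l cur acc with
  | zero =>
    have : l = [] := by cases l with | nil => rfl | cons a t => simp at h
    subst this
    simp [PySem.Chars.splitOn.go, splitD]
  | succ n ih =>
    cases l with
    | nil => simp [PySem.Chars.splitOn.go, splitD]
    | cons c rest =>
      simp only [List.length_cons] at h
      by_cases hc : c = '-'
      · rw [show PySem.Chars.splitOn.go ['-'] (n+1) (c::rest) cur acc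
              = PySem.Chars.splitOn.go ['-'] n rest [] (cur.reverse :: acc) by
            simp [PySem.Chars.splitOn.go, List.isPrefixOf, hc],
          ih rest [] _ (by omega)]
        simp [splitD, hc]
      · rw [show PySem.Chars.splitOn.go ['-'] (n+1) (c::rest) cur acc
              = PySem.Chars.splitOn.go ['-'] n rest (c :: cur) acc by
            simp [PySem.Chars.splitOn.go, List.isPrefixOf, Ne.symm hc],
          ih rest (c :: cur) _ (by omega)]
        simp [splitD, hc]

theorem splitOn_eq (cs : List Char) :
    PySem.Chars.splitOn cs ['-'] = splitD cs [] := by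
  rw [PySem.Chars.splitOn, go_eq _ _ _ _ (by omega)]
  simp

theorem splitD_length (l : List Char) : ∀ cur,
    (splitD l cur).length = l.countP (· == '-') + 1 := by
  induction l with
  | nil => intro cur; simp [splitD]
  | cons c r ih =>
    intro cur
    by_cases hc : c = '-' <;> simp [splitD, hc, ih]

theorem splitD_flatten (l : List Char) : ∀ cur,
    (splitD l cur).flatten = cur.reverse ++ l.filter (· != '-') := by
  induction l with
  | nil => intro cur; simp [splitD]
  | cons c r ih =>
    intro cur
    by_cases hc : c = '-' <;> simp [splitD, hc, ih]

-- 'all parts non-empty' scanner: the flag says whether the current piece already has a char.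
def okScan : Bool → List Char → Bool
  | b, [] => b
  | b, c :: r => if c = '-' then b && okScan false r else okScan true r

theorem splitD_all (l : List Char) : ∀ cur,
    (splitD l cur).all (fun p => ((p.length : Int) != 0)) = okScan (!cur.isEmpty) l := by
  induction l with
  | nil =>
    intro cur
    cases cur with
    | nil => simp [splitD, okScan]
    | cons a t =>
      simp only [splitD, okScan, List.all_cons, List.all_nil, List.length_reverse,
        List.isEmpty_cons, Bool.not_false, Bool.and_true]
      have h1 : (((t.length : Int) + 1) != 0) = true := by
        rw [bne_iff_ne]; omega
      simp [List.length_cons, h1]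
  | cons c r ih =>
    intro cur
    by_cases hc : c = '-'
    · subst hc
      simp only [splitD, okScan]
      rw [if_pos trivial, if_pos trivial]
      simp only [List.all_cons]
      cases cur with
      | nil => simp [ih []]
      | cons a t =>
        have h1 : (((t.length : Int) + 1) != 0) = true := by
          rw [bne_iff_ne]; omega
        simp only [List.length_reverse, List.length_cons,
          Nat.cast_add, Nat.cast_one, h1, Bool.true_and]
        simpa using ih []
    · simp only [splitD, okScan, if_neg hc, ih (c :: cur)]
      simp

theorem okScan_eq (l : List Char) : ∀ b,
    okScan b l = ((b || ((l.head? != some '-') && !l.isEmpty)) && !(hasDD l || l.getLast? == some '-')) := by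
  induction l with
  | nil => intro b; cases b <;> simp [okScan, hasDD]
  | cons c r ih =>
    intro b
    by_cases hc : c = '-'
    · subst hc
      rw [okScan, if_pos rfl, ih false]
      cases r with
      | nil => cases b <;> simp [hasDD]
      | cons b' u =>
        simp only [hasDD, List.getLast?_cons_cons, List.head?_cons, List.isEmpty_cons]
        cases b <;> cases hB : (b' == '-') <;>
          cases hD : hasDD (b' :: u) <;> cases hL : ((b' :: u).getLast? == some '-') <;>
            simp_all
    · rw [okScan, if_neg hc, ih true]
      have hcb : (c == '-') = false := by simp [hc]
      have hcb2 : ((some c == some '-')) = false := by simp [hc]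
      cases r with
      | nil => simp [hasDD, bne, hcb2]
      | cons b' u =>
        simp only [hasDD, List.getLast?_cons_cons, List.head?_cons, List.isEmpty_cons]
        simp [bne, hcb, hcb2]

theorem intercalate_nil_flatten (ps : List (List Char)) :
    ([] : List Char).intercalate ps = ps.flatten := by
  induction ps with
  | nil => simp [List.intercalate]
  | cons a t ih => cases t <;> simp_all [List.intercalate, List.intersperse]

theorem sumLoop (v : List Int) : ∀ (a m s : Int),
    v.foldl (fun (p : Int × Int) x => (p.1 + x * p.2, p.2 - 1)) (a, m)
      = (a + ((PySem.List.enumerate v s).map (fun p => p.2 * (m + s - p.1))).sum,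
         m - v.length) := by
  induction v with
  | nil => intro a m s; simp [PySem.List.enumerate]
  | cons x t ih =>
    intro a m s
    rw [List.foldl_cons, ih (a + x * m) (m - 1) (s + 1), PySem.List.enumerate_cons]
    simp only [List.map_cons, List.sum_cons, List.length_cons]
    have he : (fun (p : Int × Int) => p.2 * (m - 1 + (s + 1) - p.1)) = (fun p => p.2 * (m + s - p.1)) := by
      funext p; ring_nf
    rw [he, Prod.mk.injEq]
    refine ⟨by ring, by push_cast; ring⟩

theorem prefLoop {α : Type} (f : α → Int) (v : List α) : ∀ (r t s : Int),
    v.foldl (fun (p : Int × Int) d => (p.1 + f d, p.2 + p.1 + f d)) (r, t)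
      = (r + (v.map f).sum,
         t + v.length * r + ((PySem.List.enumerate v s).map (fun p => f p.2 * ((v.length : Int) + s - p.1))).sum) := by
  induction v with
  | nil => intro r t s; simp [PySem.List.enumerate]
  | cons x xs ih =>
    intro r t s
    rw [List.foldl_cons, ih (r + f x) (t + r + f x) (s + 1), PySem.List.enumerate_cons]
    simp only [List.map_cons, List.sum_cons, List.length_cons]
    have he : (fun (p : Int × α) => f p.2 * ((xs.length : Int) + (s + 1) - p.1))
        = (fun p => f p.2 * (((xs.length + 1 : Nat) : Int) + s - p.1)) := by
      funext p; push_cast; ring_nf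
    rw [he, Prod.mk.injEq]
    refine ⟨by ring, by push_cast; ring⟩

theorem enumerate_map {α β : Type} (f : α → β) (v : List α) : ∀ (s : Int),
    PySem.List.enumerate (v.map f) s = (PySem.List.enumerate v s).map (fun p => (p.1, f p.2)) := by
  induction v with
  | nil => intro s; simp [PySem.List.enumerate]
  | cons x t ih => intro s; simp [PySem.List.enumerate_cons, ih]

theorem a_eq_b (s : String) : codigo_valido s = codigo_valido_alt s := by
  cases hsp : PySem.Str.split? s "-" with
  | none =>
    have hm := PySem.Str.split?_map s "-"
    rw [hsp] at hm
    simp [PySem.Chars.split?] at hm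
  | some parts =>
  have hmap : parts.map String.toList = splitD s.toList [] := by
    have hm := PySem.Str.split?_map s "-"
    rw [hsp] at hm
    simp [PySem.Chars.split?] at hm
    rw [hm, splitOn_eq]
  unfold codigo_valido codigo_valido_alt
  simp only [hsp, Option.getD_some]
  rw [show PySem.List.pyRange 0 (PySem.List.len s.toList)
        = PySem.List.pyRange 0 ((s.toList.length : Int)) by rw [PySem.List.len_eq],
      loopA_spec s.toList s.toList.length le_rfl]
  simp only [List.take_length, decide_true, Bool.true_and]
  -- the two format conditions are equal
  have hplen : parts.length = s.toList.countP (· == '-') + 1 := by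
    have := congrArg List.length hmap
    simpa [splitD_length] using this
  have hcnt : (((s.toList.countP (· == '-') : Int)) != 3) = (PySem.List.len parts != 4) := by
    rw [PySem.List.len_eq, hplen, Bool.eq_iff_iff]
    simp only [bne_iff_ne, ne_eq]
    omega
  have hall : parts.all (fun p => PySem.Str.len p != 0)
      = okScan false s.toList := by
    have h1 : parts.all (fun p => PySem.Str.len p != 0)
        = (parts.map String.toList).all (fun l => ((l.length : Int) != 0)) := by
      rw [List.all_map]
      simp [PySem.Str.len_eq, Function.comp_def]
    rw [h1, hmap, splitD_all]
    simp
  have hcond : ((((s.toList.countP (· == '-') : Int)) != 3)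
        || (hasDD s.toList || (decide (0 < s.toList.length) && (s.toList.head? == some '-') && (s.toList.getLast? == some '-')))
        || ((decide (0 < s.toList.length) && (s.toList.head? == some '-')) || (s.toList.getLast? == some '-')))
      = (PySem.List.len parts != 4 || !(parts.all (fun p => PySem.Str.len p != 0))) := by
    rw [← hcnt, hall, okScan_eq]
    cases hcs : s.toList with
    | nil => simp [hasDD]
    | cons c r =>
      simp only [List.head?_cons, List.isEmpty_cons, List.length_cons, Bool.not_false,
        Bool.and_true, Bool.false_or]
      cases hB : ((some c == some '-')) <;>
        cases hD : hasDD (c :: r) <;>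
          cases hL : ((c :: r).getLast? == some '-') <;>
            cases hX : (((s.toList.countP (· == '-') : Int)) != 3) <;>
              simp_all [bne]
  rw [hcond]
  cases hc : (PySem.List.len parts != 4 || !(parts.all (fun p => PySem.Str.len p != 0))) with
  | true => simp
  | false =>
    simp only [Bool.false_eq_true, if_false]
    -- the joined string is the dash-filtered character list
    have hnum : (PySem.Str.join "" parts).toList = s.toList.filter (· != '-') := by
      rw [PySem.Str.toList_join, hmap, show ("" : String).toList = [] from rfl,
          PySem.Chars.join, intercalate_nil_flatten, splitD_flatten]
      simp
    have hlen : (PySem.Str.len (PySem.Str.join "" parts) != 10)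
        = (PySem.List.len (s.toList.filter (· != '-')) != 10) := by
      rw [PySem.Str.len_eq, hnum, PySem.List.len_eq]
    rw [hlen]
    cases hl : (PySem.List.len (s.toList.filter (· != '-')) != 10) with
    | true => simp only [if_true]
    | false =>
      simp only [Bool.false_eq_true, if_false]
      have hnl : ((s.toList.filter (· != '-')).length : Int) = 10 := by
        simp only [PySem.List.len_eq, bne_eq_false_iff_eq] at hl
        exact hl
      -- A's checksum
      rw [PySem.List.foldl_append_singleton_eq_map (fun c => (PySem.Int.ofChars? [c]).getD 0)
            (s.toList.filter (· != '-')) ([] : List Int)]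
      simp only [List.nil_append]
      rw [PySem.List.foldl_pyRange_zero_pyGetD
            ((s.toList.filter (· != '-')).map (fun c => (PySem.Int.ofChars? [c]).getD 0)) 0
            (fun (p : Int × Int) x => (p.1 + x * p.2, p.2 - 1))
            (0, PySem.List.len ((s.toList.filter (· != '-')).map (fun c => (PySem.Int.ofChars? [c]).getD 0))),
          sumLoop _ 0 _ 0]
      have hmv : PySem.List.len ((s.toList.filter (· != '-')).map (fun c => (PySem.Int.ofChars? [c]).getD 0)) = 10 := by
        rw [PySem.List.len_eq, List.length_map]
        exact hnl
      rw [hmv, enumerate_map, List.map_map]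
      -- B's checksum
      rw [hnum, prefLoop (fun d => (PySem.Int.ofChars? [d]).getD 0) (s.toList.filter (· != '-')) 0 0 0]
      simp only [hnl]
      have hfun : ((fun (p : Int × Int) => p.2 * (10 + 0 - p.1)) ∘ (fun (p : Int × Char) => (p.1, (PySem.Int.ofChars? [p.2]).getD 0)))
          = (fun (p : Int × Char) => (PySem.Int.ofChars? [p.2]).getD 0 * (10 + 0 - p.1)) := by
        funext p
        simp
      rw [hfun]
      simp

-- ===== VERDICT (by name: the statement is the Claim_ definition above) =====
theorem codigo_valido_spec : Claim_equal_codigo_valido := by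
  intro codigo_str _ _
  unfold Spec_codigo_valido
  exact a_eq_b codigo_str
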